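-- pv_equiv track=rewrite | github.com/exitf1nder/DESKTOP | skyscraper.py | calculate_total_amount
-- ===== SOURCE A (Python) =====
-- def calculate_total_amount(N, M, X):
--     total_amount = 0
--     current_price = X
--
--     for floor in range(1, N + 1):
--         total_amount += current_price
--         if floor % M == 0:
--             current_price += 1000
--
--     return total_amount
--
-- N = 25  # Количество этажей
--
-- M = 3   # Количество этажей для увеличения стоимости
--
-- X = 1000  # Стоимость квартиры на первом этаже
--
-- total_amount = calculate_total_amount(N, M, X)
-- ===== SOURCE B (Python) =====
-- def calculate_total_amount(N, M, X):
--     # Closed form: each floor f costs X + 1000*((f-1)//m), m = abs(M).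
--     if N <= 0:
--         return 0
--     m = abs(M)
--     q, r = divmod(N, m)
--     return N * X + 1000 * (m * q * (q - 1) // 2 + r * q)
-- ===== Notes on version B (the rewrite author's own statement) =====
-- stated objective: faster
-- what changed: Replaces the O(N) floor-by-floor loop with an O(1) closed form: divmod(N, abs(M)) splits the floors into full price-blocks plus a remainder, summed arithmetically.
import Mathlib
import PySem

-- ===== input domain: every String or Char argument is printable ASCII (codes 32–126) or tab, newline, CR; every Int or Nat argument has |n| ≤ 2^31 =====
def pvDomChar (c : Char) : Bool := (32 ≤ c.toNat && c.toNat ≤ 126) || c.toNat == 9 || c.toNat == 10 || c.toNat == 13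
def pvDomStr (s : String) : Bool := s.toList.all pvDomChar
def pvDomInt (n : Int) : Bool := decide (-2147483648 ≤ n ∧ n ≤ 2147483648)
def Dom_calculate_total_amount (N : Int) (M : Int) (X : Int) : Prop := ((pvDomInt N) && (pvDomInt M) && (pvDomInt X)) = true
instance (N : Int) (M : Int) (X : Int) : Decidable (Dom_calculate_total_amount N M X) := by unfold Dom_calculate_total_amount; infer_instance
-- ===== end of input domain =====

-- B replaces A's O(N) floor-by-floor loop with an O(1) closed form (full blocks of m = |M| floors per price level plus a remainder block).


-- ===== PORT A =====
def calculate_total_amount (N : Int) (M : Int) (X : Int) : Int :=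
  ((PySem.List.pyRange 1 (N + 1) 1).foldl
    (fun (st : Int × Int) floor =>
      (st.1 + st.2, if PySem.Int.mod floor M == 0 then st.2 + 1000 else st.2))
    (0, X)).1

-- ===== PORT B =====
def calculate_total_amount_alt (N : Int) (M : Int) (X : Int) : Int :=
  if N ≤ 0 then 0
  else
    let m : Int := |M|
    let q := PySem.Int.floordiv N m
    let r := PySem.Int.mod N m
    N * X + 1000 * (PySem.Int.floordiv (m * q * (q - 1)) 2 + r * q)

-- ===== PRECONDITION & SPEC =====
-- Pre_ excludes exactly the inputs where A raises ZeroDivisionError: M = 0 with at least one loop iteration (N ≥ 1); B raises there too.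
def Pre_calculate_total_amount (N : Int) (M : Int) (X : Int) : Prop := M ≠ 0 ∨ N ≤ 0
instance (N : Int) (M : Int) (X : Int) : Decidable (Pre_calculate_total_amount N M X) := by unfold Pre_calculate_total_amount; infer_instance
def pvWitness_calculate_total_amount : Int × Int × Int := (25, 3, 1000)

def Spec_calculate_total_amount (N : Int) (M : Int) (X : Int) (out : Int) : Prop := out = calculate_total_amount_alt N M X
instance (N : Int) (M : Int) (X : Int) (out : Int) : Decidable (Spec_calculate_total_amount N M X out) := by unfold Spec_calculate_total_amount; infer_instance

-- ===== CLAIM (what is proved, stated in full; the proofs are below) =====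
def Claim_equal_calculate_total_amount : Prop := ∀ (N : Int) (M : Int) (X : Int), Dom_calculate_total_amount N M X → Pre_calculate_total_amount N M X → Spec_calculate_total_amount N M X (calculate_total_amount N M X)

-- ===== LEMMAS AND PROOFS =====

-- Σ_{j<n} j/m : the total number of 1000-increments accumulated over floors 1..n.
def pvS (m n : Nat) : Nat := ∑ j ∈ Finset.range n, j / m

theorem pvS_succ (m n : Nat) : pvS m (n + 1) = pvS m n + n / m := by
  simp [pvS, Finset.sum_range_succ]

-- Closed form for the increment sum (q = n/m, r = n%m): 2·Σ = m·q·(q−1) + 2·r·q.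
theorem pvS_closed (m n : Nat) (hm : 0 < m) :
    2 * (pvS m n : Int) =
      (m : Int) * ((n / m : Nat) : Int) * (((n / m : Nat) : Int) - 1)
        + 2 * ((n % m : Nat) : Int) * ((n / m : Nat) : Int) := by
  induction n with
  | zero => simp [pvS, Nat.zero_div]
  | succ n ih =>
    have hdm : m * (n / m) + n % m = n := Nat.div_add_mod n m
    have hdm' : m * ((n + 1) / m) + (n + 1) % m = n + 1 := Nat.div_add_mod (n + 1) m
    have hq : (n + 1) / m = n / m + if m ∣ (n + 1) then 1 else 0 := Nat.succ_div
    by_cases hd : m ∣ (n + 1)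
    · rw [if_pos hd] at hq
      have hr0 : (n + 1) % m = 0 := by
        obtain ⟨k, hk⟩ := hd
        rw [hk, Nat.mul_mod_right]
      have hmul : m * ((n + 1) / m) = m * (n / m) + m := by rw [hq]; ring
      rw [hmul] at hdm'
      have hrm : n % m = m - 1 := by omega
      have hrmZ : ((n % m : Nat) : Int) = (m : Int) - 1 := by omega
      rw [pvS_succ, hq, hr0]
      simp only [Nat.cast_add, Nat.cast_one, Nat.cast_zero]
      linear_combination ih + 2 * ((n / m : Nat) : Int) * hrmZ
    · rw [if_neg hd] at hq
      rw [add_zero] at hq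
      rw [hq] at hdm'
      have hr1 : (n + 1) % m = n % m + 1 := by omega
      rw [pvS_succ, hq, hr1]
      simp only [Nat.cast_add, Nat.cast_one]
      linear_combination ih

-- The loop of A after n iterations: (total, current_price).
theorem pvLoopA (M X : Int) (n : Nat) :
    (PySem.List.pyRange 1 ((n : Int) + 1) 1).foldl
      (fun (st : Int × Int) floor =>
        (st.1 + st.2, if PySem.Int.mod floor M == 0 then st.2 + 1000 else st.2))
      (0, X)
    = ((n : Int) * X + 1000 * (pvS M.natAbs n : Int),
       X + 1000 * ((n / M.natAbs : Nat) : Int)) := by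
  induction n with
  | zero => simp [PySem.List.pyRange_one_eq_nil (le_refl (1 : Int)), pvS, Nat.zero_div]
  | succ n ih =>
    have hsplit : PySem.List.pyRange 1 ((n : Int) + 1 + 1) 1
        = PySem.List.pyRange 1 ((n : Int) + 1) 1 ++ [(n : Int) + 1] :=
      PySem.List.pyRange_one_succ_right (by omega)
    have hcast : (((n + 1 : Nat) : Int)) + 1 = ((n : Int) + 1) + 1 := by push_cast; ring
    rw [hcast, hsplit, List.foldl_append, ih]
    simp only [List.foldl_cons, List.foldl_nil]
    have hcond : (PySem.Int.mod ((n : Int) + 1) M == 0) = true ↔ M.natAbs ∣ (n + 1) := by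
      rw [beq_iff_eq, PySem.Int.mod_eq_zero_iff_dvd]
      have h1 : ((n : Int) + 1) = ((n + 1 : Nat) : Int) := by push_cast; ring
      rw [h1, ← Int.natAbs_dvd, Int.natCast_dvd_natCast]
    have hq : (n + 1) / M.natAbs = n / M.natAbs + if M.natAbs ∣ (n + 1) then 1 else 0 :=
      Nat.succ_div
    by_cases hd : M.natAbs ∣ (n + 1)
    · have hc : (PySem.Int.mod ((n : Int) + 1) M == 0) = true := hcond.mpr hd
      rw [if_pos hd] at hq
      simp only [hc, if_true, pvS_succ, hq]
      refine Prod.ext ?_ ?_ <;> push_cast <;> ring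
    · have hc : (PySem.Int.mod ((n : Int) + 1) M == 0) = false := by
        rw [Bool.eq_false_iff]; intro h; exact hd (hcond.mp h)
      rw [if_neg hd, add_zero] at hq
      simp only [hc, Bool.false_eq_true, if_false, pvS_succ, hq]
      refine Prod.ext ?_ ?_ <;> push_cast <;> ring

-- ===== VERDICT (by name: the statement is the Claim_ definition above) =====
theorem calculate_total_amount_spec : Claim_equal_calculate_total_amount := by
  intro N M X hdom hpre
  unfold Spec_calculate_total_amount
  by_cases hN : N ≤ 0
  · simp [calculate_total_amount, calculate_total_amount_alt, hN,
      PySem.List.pyRange_one_eq_nil (by omega : N + 1 ≤ 1)]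
  · have hM : M ≠ 0 := by
      rcases hpre with h | h
      · exact h
      · omega
    have hm : 0 < M.natAbs := Int.natAbs_pos.mpr hM
    have hNn : ((N.toNat : Nat) : Int) = N := Int.toNat_of_nonneg (by omega)
    have hA : calculate_total_amount N M X
        = (N.toNat : Int) * X + 1000 * (pvS M.natAbs N.toNat : Int) := by
      unfold calculate_total_amount
      conv_lhs => rw [← hNn]
      rw [pvLoopA M X N.toNat]
    rw [hA]
    simp only [calculate_total_amount_alt, if_neg hN]
    rw [Int.abs_eq_natAbs, ← hNn, PySem.Int.floordiv_natCast, PySem.Int.mod_natCast]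
    have hcl := pvS_closed M.natAbs N.toNat hm
    have heven : (M.natAbs : Int) * ((N.toNat / M.natAbs : Nat) : Int)
        * (((N.toNat / M.natAbs : Nat) : Int) - 1)
        = 2 * ((pvS M.natAbs N.toNat : Int)
            - ((N.toNat % M.natAbs : Nat) : Int) * ((N.toNat / M.natAbs : Nat) : Int)) := by
      linarith
    rw [heven, PySem.Int.floordiv_eq_ediv_of_pos (by norm_num),
      Int.mul_ediv_cancel_left _ (by norm_num)]
    simp only [Int.toNat_natCast]
    ring
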